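-- pv_equiv track=rewrite | github.com/adijose2002/A-Simple-Gene-Finder-Project | Project_01- ADITHYA JOSE.py | one_frame
-- ===== SOURCE A (Python) =====
-- def get_orf(seq):
--     ''' Takes one argument, seq. The function assumes that the given DNA sequence begins with a start codon ATG. Finds the first in-frame stop codon, and returns the sequence from the start to that stop codon. The sequence that is returned includes the start codon but not the stop codon. If there is no in-frame stop codon, get_orf assumes that the reading frame extends through the end of the sequence and simply returns the entire sequence. '''
--     es = ''
--     if seq[:3] != 'ATG':
--         return es
--     else:
--         for i in range (0, len (seq), 3):
--             if(seq[i:i+3]) == 'TAG' or seq[i:i+3] == 'TGA' or seq[i:i+3] == 'TAA':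
--                 return seq[0:i]
--         return seq
--
-- def one_frame(seq):
--     ''' Takes one argument, seq. The argument (seq) is a string containing bases for a DNA sequence. Returns a list of ORFs contained in the DNA sequence. Finds the first in-frame start codon: 'ATG'. Calls get_orf( ) with the DNA sequence beginning at that start codon. Adds the ORF returned by get_orf( ) to a list. Looks for the next start codon beginning where the ORF ends. '''
--     i = -3
--     of_list = []
--     while i <= len(seq):
--         i = i + 3
--         if seq[i: i + 3] == 'ATG':
--             of_list.append(get_orf(seq[i:]))
--             i = i + len(get_orf(seq[i:]))
--     return of_list
-- ===== SOURCE B (Python) =====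
-- def one_frame(seq):
--     orfs = []
--     in_orf = False
--     start = 0
--     for i in range(0, len(seq), 3):
--         codon = seq[i:i+3]
--         if not in_orf:
--             if codon == 'ATG':
--                 in_orf = True
--                 start = i
--         elif codon in ('TAG', 'TGA', 'TAA'):
--             orfs.append(seq[start:i])
--             in_orf = False
--     if in_orf:
--         orfs.append(seq[start:])
--     return orfs
-- ===== Notes on version B (the rewrite author's own statement) =====
-- stated objective: simpler
-- what changed: Replaced A's while-loop that calls the rescanning helper get_orf twice per start codon (materialising seq[i:] tail copies and jumping the index by the ORF's length) with a single linear pass over codon positions keeping an in_orf flag and the ORF's start index; no tail slices are built.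
import Mathlib
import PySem

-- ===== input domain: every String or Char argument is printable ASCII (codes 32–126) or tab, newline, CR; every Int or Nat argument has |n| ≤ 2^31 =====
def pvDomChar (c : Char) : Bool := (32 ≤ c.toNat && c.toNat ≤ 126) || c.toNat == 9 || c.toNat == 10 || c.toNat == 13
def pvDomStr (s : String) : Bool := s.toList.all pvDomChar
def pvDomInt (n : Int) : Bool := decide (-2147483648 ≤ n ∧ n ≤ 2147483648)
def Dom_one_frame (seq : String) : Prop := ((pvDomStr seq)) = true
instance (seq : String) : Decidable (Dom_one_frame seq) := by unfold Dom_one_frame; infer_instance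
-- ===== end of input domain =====

-- B replaces A's rescanning helper-call structure (get_orf called twice per start, with index jumps)
-- by a single linear pass over codons with an in_orf flag; objective: simpler/alternative decomposition.

-- ===== PORT A =====

-- get_orf's for-loop 'for i in range(0, len(seq), 3)' with early return at the first stop codon
def getOrfGo (t : List Char) (i : Nat) : List Char :=
  if _h : i < t.length then
    if (t.drop i).take 3 = "TAG".toList ∨ (t.drop i).take 3 = "TGA".toList ∨ (t.drop i).take 3 = "TAA".toList then
      t.take i
    else getOrfGo t (i + 3)
  else t
termination_by t.length - i

-- get_orf: '' if it does not start with ATG, else scan for the first in-frame stop codon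
def getOrf (t : List Char) : List Char :=
  if t.take 3 ≠ "ATG".toList then [] else getOrfGo t 0

-- one_frame's while-loop: i is the Python loop variable BEFORE the 'i = i + 3' at the top of the body
def loopA (s : List Char) (i : Int) : List (List Char) :=
  if _h : i ≤ (s.length : Int) then
    -- Python re-evaluates i+3 ('i = i + 3') and calls get_orf(seq[i:]) for the append and again for the jump
    if PySem.List.slice s (some (i + 3)) (some (i + 3 + 3)) = "ATG".toList then
      getOrf (PySem.List.slice s (some (i + 3)) none)
        :: loopA s (i + 3 + ((getOrf (PySem.List.slice s (some (i + 3)) none)).length : Int))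
    else loopA s (i + 3)
  else []
termination_by ((s.length : Int) + 1 - i).toNat
decreasing_by all_goals omega

def one_frame (seq : String) : List String :=
  (loopA seq.toList (-3)).map String.ofList

-- ===== PORT B =====

-- single pass over codon positions 0,3,6,… with an in_orf flag and the ORF's start index
def loopB (s : List Char) (i : Nat) (inOrf : Bool) (start : Nat) : List (List Char) :=
  if _h : i < s.length then
    if !inOrf then
      if (s.drop i).take 3 = "ATG".toList then loopB s (i + 3) true i
      else loopB s (i + 3) false start
    else
      if (s.drop i).take 3 = "TAG".toList ∨ (s.drop i).take 3 = "TGA".toList ∨ (s.drop i).take 3 = "TAA".toList then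
        (s.drop start).take (i - start) :: loopB s (i + 3) false start
      else loopB s (i + 3) true start
  else if inOrf then [s.drop start] else []
termination_by s.length - i

def one_frame_alt (seq : String) : List String :=
  (loopB seq.toList 0 false 0).map String.ofList

-- ===== PRECONDITION & SPEC =====
def Spec_one_frame (seq : String) (out : List String) : Prop := out = one_frame_alt seq
instance (seq : String) (out : List String) : Decidable (Spec_one_frame seq out) := by unfold Spec_one_frame; infer_instance

-- ===== CLAIM (what is proved, stated in full; the proofs are below) =====
def Claim_equal_one_frame : Prop := ∀ (seq : String), Dom_one_frame seq → Spec_one_frame seq (one_frame seq)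

-- ===== LEMMAS AND PROOFS =====

-- proof-side helper: the position (offset inside the tail) at which A's while-loop resumes
-- after get_orf scanned from offset k: one past the first stop codon, or the tail's length
def resumeP (t : List Char) (k : Nat) : Nat :=
  if _h : k < t.length then
    if (t.drop k).take 3 = "TAG".toList ∨ (t.drop k).take 3 = "TGA".toList ∨ (t.drop k).take 3 = "TAA".toList then
      k + 3
    else resumeP t (k + 3)
  else t.length
termination_by t.length - k

-- when not inside an ORF, loopB ignores 'start'
lemma loopB_start_irrel (s : List Char) : ∀ n i b b', s.length - i ≤ n →
    loopB s i false b = loopB s i false b' := by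
  intro n
  induction n with
  | zero =>
    intro i b b' h
    have hi : ¬ i < s.length := by omega
    conv_lhs => rw [loopB]
    conv_rhs => rw [loopB]
    simp [hi]
  | succ n ih =>
    intro i b b' h
    by_cases hi : i < s.length
    · conv_lhs => rw [loopB]
      conv_rhs => rw [loopB]
      rw [dif_pos hi, dif_pos hi]
      simp only [Bool.not_false, if_true]
      by_cases hA : (s.drop i).take 3 = "ATG".toList
      · rw [if_pos hA, if_pos hA]
      · rw [if_neg hA, if_neg hA]
        exact ih (i + 3) b b' (by omega)
    · conv_lhs => rw [loopB]
      conv_rhs => rw [loopB]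
      simp [hi]

lemma loopB_done (s : List Char) (i : Nat) (b : Nat) (h : ¬ i < s.length) :
    loopB s i false b = [] := by
  rw [loopB]; simp [h]

-- in-ORF simulation: B's in_orf scan from offset k of the tail s.drop j produces exactly
-- get_orf's scan result followed by the out-of-ORF continuation at the resume position
lemma inOrf_sim (s : List Char) (j : Nat) (hj : j ≤ s.length) (b : Nat) :
    ∀ n k, (s.drop j).length - k ≤ n →
      loopB s (j + k) true j
        = getOrfGo (s.drop j) k :: loopB s (j + resumeP (s.drop j) k) false b := by
  intro n
  induction n with
  | zero =>
    intro k h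
    have hlen : (s.drop j).length = s.length - j := by simp
    have hk : ¬ k < (s.drop j).length := by omega
    have hk' : ¬ j + k < s.length := by omega
    conv_lhs => rw [loopB]
    rw [getOrfGo, resumeP, dif_neg hk, dif_neg hk, dif_neg hk']
    simp only [if_true]
    have hje : j + (s.drop j).length = s.length := by omega
    rw [hje, loopB_done s s.length b (by omega)]
  | succ n ih =>
    intro k h
    have hlen : (s.drop j).length = s.length - j := by simp
    by_cases hk : k < (s.drop j).length
    · have hk' : j + k < s.length := by omega
      have hcod : (s.drop (j + k)).take 3 = ((s.drop j).drop k).take 3 := by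
        simp [List.drop_drop]
      conv_lhs => rw [loopB]
      rw [getOrfGo, resumeP, dif_pos hk, dif_pos hk, dif_pos hk']
      simp only [Bool.not_true, Bool.false_eq_true, if_false, hcod]
      by_cases hs : ((s.drop j).drop k).take 3 = "TAG".toList ∨ ((s.drop j).drop k).take 3 = "TGA".toList ∨ ((s.drop j).drop k).take 3 = "TAA".toList
      · rw [if_pos hs, if_pos hs, if_pos hs]
        have h1 : j + k - j = k := by omega
        have h2 : j + k + 3 = j + (k + 3) := by omega
        rw [h1, h2, loopB_start_irrel s s.length (j + (k + 3)) j b (by omega)]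
      · rw [if_neg hs, if_neg hs, if_neg hs]
        have h2 : j + k + 3 = j + (k + 3) := by omega
        rw [h2]
        exact ih (k + 3) (by omega)
    · have hk' : ¬ j + k < s.length := by omega
      conv_lhs => rw [loopB]
      rw [getOrfGo, resumeP, dif_neg hk, dif_neg hk, dif_neg hk']
      rw [if_pos rfl]
      have hje : j + (s.drop j).length = s.length := by omega
      rw [hje, loopB_done s s.length b (by omega)]

-- the resume position is either one-past-the-stop (3 after the returned ORF's end) or,
-- when no stop codon exists, the tail's length (get_orf returns the whole tail)
lemma resume_char (t : List Char) : ∀ n k, t.length - k ≤ n →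
    resumeP t k = (getOrfGo t k).length + 3
    ∨ (getOrfGo t k = t ∧ resumeP t k = t.length) := by
  intro n
  induction n with
  | zero =>
    intro k h
    have hk : ¬ k < t.length := by omega
    rw [getOrfGo, resumeP, dif_neg hk, dif_neg hk]
    right; exact ⟨rfl, rfl⟩
  | succ n ih =>
    intro k h
    by_cases hk : k < t.length
    · rw [getOrfGo, resumeP, dif_pos hk, dif_pos hk]
      by_cases hs : (t.drop k).take 3 = "TAG".toList ∨ (t.drop k).take 3 = "TGA".toList ∨ (t.drop k).take 3 = "TAA".toList
      · rw [if_pos hs, if_pos hs]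
        left
        simp only [List.length_take]
        omega
      · rw [if_neg hs, if_neg hs]
        exact ih (k + 3) (by omega)
    · rw [getOrfGo, resumeP, dif_neg hk, dif_neg hk]
      right; exact ⟨rfl, rfl⟩

-- main simulation: A's while-loop from pre-increment value j-3 equals B's scan from j
lemma main_sim (s : List Char) (b : Nat) : ∀ n j, s.length + 4 - j ≤ n →
    loopA s ((j : Int) - 3) = loopB s j false b := by
  intro n
  induction n with
  | zero =>
    intro j h
    have hj : ¬ ((j : Int) - 3 ≤ (s.length : Int)) := by omega
    have hj' : ¬ j < s.length := by omega
    rw [loopA, dif_neg hj, loopB_done s j b hj']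
  | succ n ih =>
    intro j h
    by_cases hc : ((j : Int) - 3 ≤ (s.length : Int))
    · conv_lhs => rw [loopA]
      rw [dif_pos hc]
      have e1 : (j : Int) - 3 + 3 = (j : Int) := by ring
      rw [e1]
      have e2 : (j : Int) + 3 = ((j + 3 : Nat) : Int) := by push_cast; ring
      rw [e2, PySem.List.slice_natCast, PySem.List.slice_from_natCast]
      have e3 : j + 3 - j = 3 := by omega
      rw [e3]
      by_cases hA : (s.drop j).take 3 = "ATG".toList
      · -- start codon found at j
        have hlen : (s.drop j).length = s.length - j := by simp
        have hlen3 : 3 ≤ (s.drop j).length := by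
          have h4 := congrArg List.length hA
          simp only [List.length_take] at h4
          have : "ATG".toList.length = 3 := by decide
          omega
        have hjle : j + 3 ≤ s.length := by omega
        rw [if_pos hA]
        have horf : getOrf (s.drop j) = getOrfGo (s.drop j) 3 := by
          rw [getOrf, if_neg (by simp [hA])]
          rw [getOrfGo, dif_pos (by omega : 0 < (s.drop j).length)]
          rw [if_neg (by simp only [List.drop_zero]; rw [hA]; decide)]
        rw [horf]
        -- B side
        have hjlt : j < s.length := by omega
        conv_rhs => rw [loopB]
        rw [dif_pos hjlt]
        simp only [Bool.not_false, if_true]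
        rw [if_pos hA]
        rw [inOrf_sim s j (by omega) b ((s.drop j).length) 3 (by omega)]
        congr 1
        rcases resume_char (s.drop j) ((s.drop j).length) 3 (by omega) with hr | ⟨ho, hr⟩
        · rw [hr]
          have hih := ih (j + (getOrfGo (s.drop j) 3).length + 3) (by omega)
          have ecast : ((j + (getOrfGo (s.drop j) 3).length + 3 : Nat) : Int) - 3
              = (j : Int) + ((getOrfGo (s.drop j) 3).length : Int) := by push_cast; ring
          rw [ecast] at hih
          rw [hih]
          have e5 : j + (getOrfGo (s.drop j) 3).length + 3 = j + ((getOrfGo (s.drop j) 3).length + 3) := by omega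
          rw [e5]
        · rw [ho, hr]
          have e4 : (j : Int) + (((s.drop j).length : Nat) : Int) = ((s.length + 3 : Nat) : Int) - 3 := by
            rw [hlen]; push_cast; omega
          rw [e4, ih (s.length + 3) (by omega)]
          rw [loopB_done s (s.length + 3) b (by omega)]
          have e6 : j + (s.drop j).length = s.length := by omega
          rw [e6, loopB_done s s.length b (by omega)]
      · -- no start codon at j: both step to j + 3
        rw [if_neg hA]
        have estep : (j : Int) = ((j + 3 : Nat) : Int) - 3 := by push_cast; ring
        rw [estep, ih (j + 3) (by omega)]
        by_cases hjlt : j < s.length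
        · conv_rhs => rw [loopB]
          rw [dif_pos hjlt]
          simp only [Bool.not_false, if_true]
          rw [if_neg hA]
        · rw [loopB_done s j b hjlt, loopB_done s (j + 3) b (by omega)]
    · rw [loopA, dif_neg hc, loopB_done s j b (by omega)]

-- ===== VERDICT (by name: the statement is the Claim_ definition above) =====
theorem one_frame_spec : Claim_equal_one_frame := by
  intro seq _
  unfold Spec_one_frame one_frame one_frame_alt
  have h : ((-3 : Int)) = ((0 : Nat) : Int) - 3 := by norm_num
  rw [h, main_sim seq.toList 0 (seq.toList.length + 4) 0 (by omega)]
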